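-- pv_equiv track=rewrite | github.com/yje9802/Algorithms | 프로그래머스/3/388354. 홀짝트리/홀짝트리.py | solution
-- ===== SOURCE A (Python) =====
-- from collections import defaultdict
--
-- def solution(nodes, edges):
--     answer = [0, 0]
--
--     graph = defaultdict(set) # 노드 번호: set(연결된 노드1, ...)
--     for edge in edges:
--         a, b = edge
--         graph[a].add(b)
--         graph[b].add(a)
--
--     # 각 서브 트리의 노드 종류 정리
--     def calc_node_types(graph, visited, type_result, start):
--         visited.add(start) # 시작하는 노드 방문 처리
--
--         # 노드 종류 판단
--         if (start % 2 == 1) and (len(graph[start]) % 2 == 1): # 홀수 노드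
--             type_result[0] += 1
--         elif (start % 2 == 0) and (len(graph[start]) % 2 == 0): # 짝수 노드
--             type_result[1] += 1
--         elif (start % 2 == 1) and (len(graph[start]) % 2 == 0): # 역홀수 노드
--             type_result[2] += 1
--         elif (start % 2 == 0) and (len(graph[start]) % 2 == 1): # 역짝수 노드
--             type_result[3] += 1
--
--         for node in graph[start]:
--             if node not in visited:
--                 calc_node_types(graph, visited, type_result, node)
--
--         return
--
--     visited = set()
--     for node in nodes:
--         if node not in visited:
--             visited.add(node)
--             node_types = [0, 0, 0, 0] # 홀수 노드, 짝수 노드, 역홀수 노드, 역짝수 노드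
--             calc_node_types(graph, visited, node_types, node)
--
--             if node_types[0] + node_types[1] == 1:
--                 # (서브) 트리에서 홀수 or 짝수 노드가 하나 밖에 없기 때문에 홀짝 트리로 만들 수 있음
--                 answer[0] += 1
--             if node_types[2] + node_types[3] == 1:
--                 answer[1] += 1
--
--     return answer
-- ===== SOURCE B (Python) =====
-- def solution(nodes, edges):
--     # adjacency as sets of distinct neighbours (duplicate edges / self-loops collapse)
--     adj = {}
--     for a, b in edges:
--         adj.setdefault(a, set()).add(b)
--         adj.setdefault(b, set()).add(a)
--
--     visited = set()
--     full = 0   # components buildable as an odd-even tree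
--     rev = 0    # components buildable as a reversed odd-even tree
--     for node in nodes:
--         if node in visited:
--             continue
--         same = 0   # nodes whose value parity equals their degree parity
--         diff = 0   # nodes where the two parities differ
--         stack = [node]
--         while stack:
--             v = stack.pop()
--             if v in visited:
--                 continue
--             visited.add(v)
--             nbrs = adj.get(v, set())
--             if (v + len(nbrs)) % 2 == 0:
--                 same += 1
--             else:
--                 diff += 1
--             for w in nbrs:
--                 stack.append(w)
--         if same == 1:
--             full += 1
--         if diff == 1:
--             rev += 1
--     return [full, rev]
-- ===== Notes on version B (the rewrite author's own statement) =====
-- stated objective: simpler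
-- what changed: Replaces the recursive four-way-classifying DFS by an iterative explicit-stack traversal that keeps only the two sums A actually uses (value parity == / != degree parity, tested with one (v+deg)%2 check instead of a four-branch elif chain and a 4-slot tally).
import Mathlib
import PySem

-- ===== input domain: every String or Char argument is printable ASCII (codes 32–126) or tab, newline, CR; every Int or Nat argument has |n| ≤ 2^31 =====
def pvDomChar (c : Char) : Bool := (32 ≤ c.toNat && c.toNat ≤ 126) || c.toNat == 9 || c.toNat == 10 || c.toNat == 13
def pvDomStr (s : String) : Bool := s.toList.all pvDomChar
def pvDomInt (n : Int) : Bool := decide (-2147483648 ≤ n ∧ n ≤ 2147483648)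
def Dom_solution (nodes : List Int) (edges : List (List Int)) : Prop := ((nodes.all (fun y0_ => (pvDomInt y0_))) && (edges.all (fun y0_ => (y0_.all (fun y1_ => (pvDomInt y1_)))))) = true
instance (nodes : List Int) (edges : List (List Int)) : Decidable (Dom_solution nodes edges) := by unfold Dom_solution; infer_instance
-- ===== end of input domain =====

-- B replaces A's recursive four-way-classifying DFS by an explicit-stack traversal that keeps
-- only the two parity sums A actually uses; objective: simpler. Return values only (neither
-- Python mutates its arguments).

-- ===== PORT A =====

-- graph = defaultdict(set); for edge in edges: a, b = edge; graph[a].add(b); graph[b].add(a)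
def pvAGraph (edges : List (List Int)) : PySem.Dict Int (PySem.Set Int) :=
  edges.foldl (fun g e =>
    match e with
    | [a, b] =>
      let g := g.insert a (PySem.Set.add (g.getD a PySem.Set.empty) b)
      g.insert b (PySem.Set.add (g.getD b PySem.Set.empty) a)
    | _ => g   -- Python raises ValueError ('a, b = edge'); such inputs are outside Pre_solution
  ) PySem.Dict.empty

-- calc_node_types before the neighbour loop: visited.add(start) and the elif chain on
-- start % 2 and len(graph[start]) % 2 (type_result as a 4-tuple)
def pvAMark (g : PySem.Dict Int (PySem.Set Int))
    (st : PySem.Set Int × (Int × Int × Int × Int)) (start : Int) :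
    PySem.Set Int × (Int × Int × Int × Int) :=
  let vis := PySem.Set.add st.1 start
  let d : Int := ((g.getD start PySem.Set.empty).length : Int)   -- len(graph[start])
  let t := st.2
  let t :=
    if PySem.Int.mod start 2 = 1 ∧ PySem.Int.mod d 2 = 1 then (t.1 + 1, t.2.1, t.2.2.1, t.2.2.2)
    else if PySem.Int.mod start 2 = 0 ∧ PySem.Int.mod d 2 = 0 then (t.1, t.2.1 + 1, t.2.2.1, t.2.2.2)
    else if PySem.Int.mod start 2 = 1 ∧ PySem.Int.mod d 2 = 0 then (t.1, t.2.1, t.2.2.1 + 1, t.2.2.2)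
    else if PySem.Int.mod start 2 = 0 ∧ PySem.Int.mod d 2 = 1 then (t.1, t.2.1, t.2.2.1, t.2.2.2 + 1)
    else t
  (vis, t)

-- calc_node_types' recursion over the neighbours, guarded by the visited set.  Python's
-- recursion terminates because visited grows; the fuel only bounds the depth and is never
-- exhausted for the fuel chosen in `solution`.  (Python iterates the neighbour set in hash
-- order; the PySem.Set insertion order is used here — the tallies are order-independent.)
def pvACalc (g : PySem.Dict Int (PySem.Set Int)) :
    Nat → PySem.Set Int × (Int × Int × Int × Int) → Int → PySem.Set Int × (Int × Int × Int × Int)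
  | 0, st, start => pvAMark g st start
  | f + 1, st, start =>
    (g.getD start PySem.Set.empty).foldl
      (fun st n => if PySem.Set.contains st.1 n then st else pvACalc g f st n)
      (pvAMark g st start)

def solution (nodes : List Int) (edges : List (List Int)) : List Int :=
  let graph := pvAGraph edges
  let fuel := nodes.length + 2 * edges.length + 1
  let res :=
    nodes.foldl (fun (acc : PySem.Set Int × Int × Int) node =>
      if PySem.Set.contains acc.1 node then acc
      else
        let st := pvACalc graph fuel (PySem.Set.add acc.1 node, (0, 0, 0, 0)) node
        (st.1,
         acc.2.1 + (if st.2.1 + st.2.2.1 = 1 then 1 else 0),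
         acc.2.2 + (if st.2.2.2.1 + st.2.2.2.2 = 1 then 1 else 0)))
      (PySem.Set.empty, 0, 0)
  [res.2.1, res.2.2]

-- ===== PORT B =====

-- adj = {}; for a, b in edges: adj.setdefault(a, set()).add(b); adj.setdefault(b, set()).add(a)
def pvBGraph (edges : List (List Int)) : PySem.Dict Int (PySem.Set Int) :=
  edges.foldl (fun adj e =>
    match e with
    | [a, b] =>
      let adj := adj.insert a (PySem.Set.add (adj.getD a PySem.Set.empty) b)
      adj.insert b (PySem.Set.add (adj.getD b PySem.Set.empty) a)
    | _ => adj   -- Python raises ValueError ('for a, b in edges'); outside Pre_solution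
  ) PySem.Dict.empty

-- the body of Source B's while loop after the pop-check: mark v and bump one of the two counters
def pvBVisit (g : PySem.Dict Int (PySem.Set Int))
    (st : PySem.Set Int × Int × Int) (v : Int) : PySem.Set Int × Int × Int :=
  let nbrs := g.getD v PySem.Set.empty
  let vis := PySem.Set.add st.1 v
  if PySem.Int.mod (v + (nbrs.length : Int)) 2 = 0 then (vis, st.2.1 + 1, st.2.2)
  else (vis, st.2.1, st.2.2 + 1)

-- weights for the termination measure of the stack loop (proof device only)
def pvW (N : Nat) : Nat → Nat
  | 0 => 1
  | f + 1 => N * pvW N f + 1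

def pvAdjSize (g : PySem.Dict Int (PySem.Set Int)) : Nat :=
  (g.items.map (fun p => p.2.length)).sum

theorem pvW_pos (N f : Nat) : 0 < pvW N f := by
  cases f <;> simp [pvW]

theorem pvLen_getD_le (g : PySem.Dict Int (PySem.Set Int)) (v : Int) :
    (g.getD v PySem.Set.empty).length ≤ pvAdjSize g := by
  rcases g with ⟨l⟩
  induction l with
  | nil => simp [PySem.Dict.getD, PySem.Dict.get?, pvAdjSize, PySem.Set.empty]
  | cons p rest ih =>
    rcases p with ⟨k, s⟩
    simp only [PySem.Dict.getD, PySem.Dict.get?_mk_cons, pvAdjSize, List.map_cons,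
      List.sum_cons] at *
    by_cases h : k == v
    · simp [h]
    · simp only [h] at *
      simp at *
      omega

theorem pvMapSum (N : Nat) (f : Nat) (l : List Int) :
    ((l.map (fun w => (w, f))).map (fun p : Int × Nat => pvW N p.2)).sum
      = l.length * pvW N f := by
  induction l with
  | nil => simp
  | cons a t ih => simp only [List.map_cons, List.sum_cons, ih, List.length_cons]; ring

-- Source B's while loop over the explicit stack.  Each stack entry carries a residual depth bound
-- (a pure totality device: with the fuel chosen in `solution_alt` it is never exhausted);
-- the Lean stack keeps its top at the head (Python pops from the end, and Python's set
-- iteration order is unspecified anyway — the counters are order-independent).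
def pvBLoop (g : PySem.Dict Int (PySem.Set Int)) :
    List (Int × Nat) → PySem.Set Int × Int × Int → PySem.Set Int × Int × Int
  | [], st => st
  | (v, f) :: stk, st =>
    if PySem.Set.contains st.1 v then pvBLoop g stk st
    else
      match f with
      | 0 => pvBLoop g stk (pvBVisit g st v)
      | f + 1 =>
        pvBLoop g (((g.getD v PySem.Set.empty).map (fun w => (w, f))) ++ stk) (pvBVisit g st v)
  termination_by stk _ => (stk.map (fun p => pvW (pvAdjSize g) p.2)).sum
  decreasing_by
  · simp only [List.map_cons, List.sum_cons]
    have := pvW_pos (pvAdjSize g) f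
    omega
  · simp only [List.map_cons, List.sum_cons]
    have := pvW_pos (pvAdjSize g) 0
    omega
  · simp only [List.map_cons, List.sum_cons, List.map_append, List.sum_append]
    rw [pvMapSum]
    have h1 := pvLen_getD_le g v
    have h2 := pvW_pos (pvAdjSize g) f
    have h3 : (g.getD v PySem.Set.empty).length * pvW (pvAdjSize g) f
        ≤ pvAdjSize g * pvW (pvAdjSize g) f := Nat.mul_le_mul_right _ h1
    simp only [pvW]
    omega

def solution_alt (nodes : List Int) (edges : List (List Int)) : List Int :=
  let adj := pvBGraph edges
  let fuel := nodes.length + 2 * edges.length + 1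
  let res :=
    nodes.foldl (fun (acc : PySem.Set Int × Int × Int) node =>
      if PySem.Set.contains acc.1 node then acc
      else
        let st := pvBLoop adj [(node, fuel)] (acc.1, 0, 0)
        (st.1,
         acc.2.1 + (if st.2.1 = 1 then 1 else 0),
         acc.2.2 + (if st.2.2 = 1 then 1 else 0)))
      (PySem.Set.empty, 0, 0)
  [res.2.1, res.2.2]

-- ===== PRECONDITION & SPEC =====
-- Pre_ excludes exactly the inputs where Python's 'a, b = edge' unpacking raises ValueError
-- (an edge whose length is not 2); both programs raise there.
def Pre_solution (nodes : List Int) (edges : List (List Int)) : Prop :=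
  ∀ e ∈ edges, e.length = 2
instance (nodes : List Int) (edges : List (List Int)) : Decidable (Pre_solution nodes edges) := by
  unfold Pre_solution; infer_instance

def pvWitness_solution : List Int × List (List Int) := ([1, 2, 4, 7], [[1, 2], [2, 4]])

def Spec_solution (nodes : List Int) (edges : List (List Int)) (out : List Int) : Prop := out = solution_alt nodes edges
instance (nodes : List Int) (edges : List (List Int)) (out : List Int) : Decidable (Spec_solution nodes edges out) := by unfold Spec_solution; infer_instance

-- ===== CLAIM (what is proved, stated in full; the proofs are below) =====
def Claim_equal_solution : Prop := ∀ (nodes : List Int) (edges : List (List Int)), Dom_solution nodes edges → Pre_solution nodes edges → Spec_solution nodes edges (solution nodes edges)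

-- ===== LEMMAS AND PROOFS =====

-- ghost recursion: the recursive shape of pvBLoop on B's two-counter state (proof-only helper)
def pvBCalc (g : PySem.Dict Int (PySem.Set Int)) :
    Nat → PySem.Set Int × Int × Int → Int → PySem.Set Int × Int × Int
  | 0, st, v => pvBVisit g st v
  | f + 1, st, v =>
    (g.getD v PySem.Set.empty).foldl
      (fun st n => if PySem.Set.contains st.1 n then st else pvBCalc g f st n)
      (pvBVisit g st v)

-- abstraction relation: same visited set, B's counters are the pairwise sums of A's 4 tallies
def pvRel (a : PySem.Set Int × (Int × Int × Int × Int)) (b : PySem.Set Int × Int × Int) : Prop :=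
  b.1 = a.1 ∧ b.2.1 = a.2.1 + a.2.2.1 ∧ b.2.2 = a.2.2.2.1 + a.2.2.2.2

theorem pvMark_rel (g : PySem.Dict Int (PySem.Set Int))
    (a : PySem.Set Int × (Int × Int × Int × Int)) (b : PySem.Set Int × Int × Int) (v : Int)
    (hvis : PySem.Set.add b.1 v = PySem.Set.add a.1 v)
    (h1 : b.2.1 = a.2.1 + a.2.2.1) (h2 : b.2.2 = a.2.2.2.1 + a.2.2.2.2) :
    pvRel (pvAMark g a v) (pvBVisit g b v) := by
  have hm : ∀ x : Int, PySem.Int.mod x 2 = x % 2 :=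
    fun x => PySem.Int.mod_eq_emod_of_pos (by omega)
  simp only [pvAMark, pvBVisit, pvRel, hm]
  split_ifs with c1 c2 c3 c4 c5 <;>
    refine ⟨hvis, ?_, ?_⟩ <;> dsimp only <;> omega

theorem pvFold_rel (g : PySem.Dict Int (PySem.Set Int)) (f : Nat)
    (hcalc : ∀ (v : Int) a b, pvRel a b → pvRel (pvACalc g f a v) (pvBCalc g f b v)) :
    ∀ (l : List Int) a b, pvRel a b →
      pvRel (l.foldl (fun st n => if PySem.Set.contains st.1 n then st else pvACalc g f st n) a)
            (l.foldl (fun st n => if PySem.Set.contains st.1 n then st else pvBCalc g f st n) b) := by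
  intro l
  induction l with
  | nil => intro a b h; exact h
  | cons n t ih =>
    intro a b h
    simp only [List.foldl_cons]
    rw [h.1]
    by_cases hc : PySem.Set.contains a.1 n
    · simp only [hc, if_true]; exact ih a b h
    · simp only [hc, if_false]; exact ih _ _ (hcalc n a b h)

theorem pvCalc_rel (g : PySem.Dict Int (PySem.Set Int)) (f : Nat) :
    ∀ (v : Int) a b, pvRel a b → pvRel (pvACalc g f a v) (pvBCalc g f b v) := by
  induction f with
  | zero =>
    intro v a b h
    exact pvMark_rel g a b v (by rw [h.1]) h.2.1 h.2.2
  | succ f ih =>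
    intro v a b h
    simp only [pvACalc, pvBCalc]
    exact pvFold_rel g f ih _ _ _ (pvMark_rel g a b v (by rw [h.1]) h.2.1 h.2.2)

theorem pvLoop_defunc (g : PySem.Dict Int (PySem.Set Int)) :
    ∀ (f : Nat) (l : List Int) (s : List (Int × Nat)) st,
      pvBLoop g (l.map (fun w => (w, f)) ++ s) st
        = pvBLoop g s (l.foldl
            (fun st n => if PySem.Set.contains st.1 n then st else pvBCalc g f st n) st) := by
  intro f
  induction f with
  | zero =>
    intro l
    induction l with
    | nil => intro s st; simp
    | cons v t ih =>
      intro s st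
      simp only [List.map_cons, List.cons_append, List.foldl_cons]
      rw [pvBLoop]
      by_cases hc : PySem.Set.contains st.1 v
      · rw [if_pos hc, ih, if_pos hc]
      · rw [if_neg hc, ih, if_neg hc]
        simp only [pvBCalc]
  | succ f ihf =>
    intro l
    induction l with
    | nil => intro s st; simp
    | cons v t ih =>
      intro s st
      simp only [List.map_cons, List.cons_append, List.foldl_cons]
      rw [pvBLoop]
      by_cases hc : PySem.Set.contains st.1 v
      · rw [if_pos hc, ih, if_pos hc]
      · rw [if_neg hc, ihf, ih, if_neg hc]
        simp only [pvBCalc]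

theorem pvLoop_single (g : PySem.Dict Int (PySem.Set Int)) (f : Nat) (v : Int)
    (st : PySem.Set Int × Int × Int)
    (h : ¬ PySem.Set.contains st.1 v = true) :
    pvBLoop g [(v, f + 1)] st = pvBCalc g (f + 1) st v := by
  rw [pvBLoop, if_neg h, pvLoop_defunc]
  simp only [pvBCalc, pvBLoop]

theorem pvAdd_add_self (s : PySem.Set Int) (v : Int) :
    PySem.Set.add (PySem.Set.add s v) v = PySem.Set.add s v := by
  simp only [PySem.Set.add, PySem.Set.contains]
  split_ifs <;> simp_all

theorem pvGraph_eq (edges : List (List Int)) : pvBGraph edges = pvAGraph edges := rfl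

theorem pvOuter (g : PySem.Dict Int (PySem.Set Int)) (F : Nat) :
    ∀ (l : List Int) (acc : PySem.Set Int × Int × Int),
      l.foldl (fun (acc : PySem.Set Int × Int × Int) node =>
        if PySem.Set.contains acc.1 node then acc
        else
          let st := pvACalc g (F + 1) (PySem.Set.add acc.1 node, (0, 0, 0, 0)) node
          (st.1,
           acc.2.1 + (if st.2.1 + st.2.2.1 = 1 then 1 else 0),
           acc.2.2 + (if st.2.2.2.1 + st.2.2.2.2 = 1 then 1 else 0))) acc
      = l.foldl (fun (acc : PySem.Set Int × Int × Int) node =>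
        if PySem.Set.contains acc.1 node then acc
        else
          let st := pvBLoop g [(node, F + 1)] (acc.1, 0, 0)
          (st.1,
           acc.2.1 + (if st.2.1 = 1 then 1 else 0),
           acc.2.2 + (if st.2.2 = 1 then 1 else 0))) acc := by
  intro l
  induction l with
  | nil => intro acc; rfl
  | cons n t ih =>
    intro acc
    simp only [List.foldl_cons]
    by_cases hc : PySem.Set.contains acc.1 n
    · rw [if_pos hc, if_pos hc]
      exact ih acc
    · rw [if_neg hc, if_neg hc]
      have hrel : pvRel (pvACalc g (F + 1) (PySem.Set.add acc.1 n, (0, 0, 0, 0)) n)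
          (pvBCalc g (F + 1) (acc.1, 0, 0) n) := by
        simp only [pvACalc, pvBCalc]
        refine pvFold_rel g F (pvCalc_rel g F) _ _ _ ?_
        exact pvMark_rel g _ _ n (by dsimp only; rw [pvAdd_add_self]) rfl rfl
      rw [pvLoop_single g F n (acc.1, 0, 0) hc]
      rcases hrel with ⟨hv, h1, h2⟩
      rw [ih]
      congr 1
      dsimp only
      rw [hv, h1, h2]

-- ===== VERDICT (by name: the statement is the Claim_ definition above) =====
theorem solution_spec : Claim_equal_solution := by
  intro nodes edges _ _
  unfold Spec_solution solution solution_alt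
  rw [pvGraph_eq]
  dsimp only
  rw [pvOuter (pvAGraph edges) (nodes.length + 2 * edges.length) nodes (PySem.Set.empty, 0, 0)]
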